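-- pv_equiv track=rewrite | github.com/leporis/Works | Lecture/IoT_and_BigData/Week_1/build.py | insert_after_heading
-- ===== SOURCE A (Python) =====
-- def insert_after_heading(content, heading_keyword, img_md):
--     lines = content.split('\n')
--     result = []
--     inserted = False
--     for line in lines:
--         result.append(line)
--         if not inserted and line.startswith('#') and heading_keyword in line:
--             result.append('')
--             result.append(img_md)
--             result.append('')
--             inserted = True
--     return '\n'.join(result)
-- ===== SOURCE B (Python) =====
-- def insert_after_heading(content, heading_keyword, img_md):
--     lines = content.split('\n')
--     i = next((i for i, l in enumerate(lines)
--               if l.startswith('#') and heading_keyword in l), None)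
--     if i is None:
--         return '\n'.join(lines)
--     return '\n'.join(lines[:i + 1] + ['', img_md, ''] + lines[i + 1:])
-- ===== Notes on version B (the rewrite author's own statement) =====
-- stated objective: simpler
-- what changed: Replaces the accumulate-while-scanning loop with flag state by locating the index of the first matching heading and splicing the three inserted lines in by slice concatenation.
import Mathlib
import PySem

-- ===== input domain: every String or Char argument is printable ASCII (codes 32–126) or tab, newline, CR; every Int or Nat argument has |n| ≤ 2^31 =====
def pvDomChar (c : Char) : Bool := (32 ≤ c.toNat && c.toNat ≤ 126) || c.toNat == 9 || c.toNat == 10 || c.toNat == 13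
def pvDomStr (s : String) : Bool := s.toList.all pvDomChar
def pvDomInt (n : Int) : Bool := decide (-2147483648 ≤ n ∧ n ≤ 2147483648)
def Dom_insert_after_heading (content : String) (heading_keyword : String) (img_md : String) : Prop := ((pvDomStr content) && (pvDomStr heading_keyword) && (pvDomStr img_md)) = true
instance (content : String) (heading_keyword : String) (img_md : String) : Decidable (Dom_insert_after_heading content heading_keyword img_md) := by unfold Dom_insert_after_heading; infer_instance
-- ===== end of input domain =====

-- B replaces A's accumulate-while-scanning loop (with an `inserted` flag) by
-- locate-the-first-matching-heading-then-splice; same O(n) cost, simpler shape.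

-- ===== PORT A =====
-- literal port of A: scan the lines, appending each to `result`, and right after the
-- first line that starts with '#' and contains the keyword append '', img_md, ''.
-- stepA is the loop body of A's `for line in lines` (state = (result, inserted)).
def stepA (heading_keyword : String) (img_md : String) (st : List String × Bool) (line : String) : List String × Bool :=
  let result := st.1 ++ [line]
  if !st.2 && (PySem.Str.startswith line "#" && PySem.Str.isIn heading_keyword line)
  then (result ++ ["", img_md, ""], true)
  else (result, st.2)

def insert_after_heading (content : String) (heading_keyword : String) (img_md : String) : String :=
  let lines := (PySem.Str.split? content "\n").getD []   -- sep "\n" is nonempty so split? is always some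
  let st := lines.foldl (stepA heading_keyword img_md) ([], false)
  PySem.Str.join "\n" st.1

-- ===== PORT B =====
def insert_after_heading_alt (content : String) (heading_keyword : String) (img_md : String) : String :=
  let lines := (PySem.Str.split? content "\n").getD []   -- sep "\n" is nonempty so split? is always some
  match lines.findIdx? (fun l => PySem.Str.startswith l "#" && PySem.Str.isIn heading_keyword l) with
  | none => PySem.Str.join "\n" lines
  | some i => PySem.Str.join "\n" (lines.take (i + 1) ++ ["", img_md, ""] ++ lines.drop (i + 1))

-- ===== PRECONDITION & SPEC =====
def Spec_insert_after_heading (content : String) (heading_keyword : String) (img_md : String) (out : String) : Prop := out = insert_after_heading_alt content heading_keyword img_md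
instance (content : String) (heading_keyword : String) (img_md : String) (out : String) : Decidable (Spec_insert_after_heading content heading_keyword img_md out) := by unfold Spec_insert_after_heading; infer_instance

-- ===== CLAIM (what is proved, stated in full; the proofs are below) =====
def Claim_equal_insert_after_heading : Prop := ∀ (content : String) (heading_keyword : String) (img_md : String), Dom_insert_after_heading content heading_keyword img_md → Spec_insert_after_heading content heading_keyword img_md (insert_after_heading content heading_keyword img_md)

-- ===== LEMMAS AND PROOFS =====

theorem stepA_of_inserted (kw img : String) (acc : List String) (l : String) :
    stepA kw img (acc, true) l = (acc ++ [l], true) := by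
  simp [stepA]

theorem stepA_of_not_inserted (kw img : String) (acc : List String) (l : String) :
    stepA kw img (acc, false) l =
      if PySem.Str.startswith l "#" && PySem.Str.isIn kw l
      then (acc ++ [l] ++ ["", img, ""], true) else (acc ++ [l], false) := by
  simp [stepA]

-- once the flag is set, A's loop just appends the remaining lines
theorem loop_after_insert (kw img : String) :
    ∀ (ls acc : List String),
      ls.foldl (stepA kw img) (acc, true) = (acc ++ ls, true) := by
  intro ls
  induction ls with
  | nil => simp
  | cons l ls ih =>
    intro acc
    rw [List.foldl_cons, stepA_of_inserted, ih]
    simp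

-- A's loop from a clear flag computes the locate-then-splice result
theorem loop_eq_splice (kw img : String) :
    ∀ (ls acc : List String),
      (ls.foldl (stepA kw img) (acc, false)).1
      = acc ++ (match ls.findIdx? (fun l => PySem.Str.startswith l "#" && PySem.Str.isIn kw l) with
                | none => ls
                | some i => ls.take (i + 1) ++ ["", img, ""] ++ ls.drop (i + 1)) := by
  intro ls
  induction ls with
  | nil => simp
  | cons l ls ih =>
    intro acc
    rw [List.foldl_cons, stepA_of_not_inserted, List.findIdx?_cons]
    by_cases hp : (PySem.Str.startswith l "#" && PySem.Str.isIn kw l) = true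
    · rw [if_pos hp, if_pos hp, loop_after_insert]
      simp
    · rw [if_neg hp, if_neg hp, ih]
      cases h : ls.findIdx? (fun l => PySem.Str.startswith l "#" && PySem.Str.isIn kw l) with
      | none => simp
      | some i => simp

-- ===== VERDICT (by name: the statement is the Claim_ definition above) =====
theorem insert_after_heading_spec : Claim_equal_insert_after_heading := by
  intro content heading_keyword img_md _
  unfold Spec_insert_after_heading insert_after_heading insert_after_heading_alt
  have key := loop_eq_splice heading_keyword img_md ((PySem.Str.split? content "\n").getD []) []
  simp only [List.nil_append] at key
  simp only [key]
  cases h : List.findIdx? (fun l => PySem.Str.startswith l "#" && PySem.Str.isIn heading_keyword l)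
      ((PySem.Str.split? content "\n").getD []) <;> simp [h]
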